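-- pv_equiv track=rewrite | github.com/spoole50/DNAHiddenMessages | Week1/pyScripts/CC_6.py | numToPat
-- ===== SOURCE A (Python) =====
-- def numToSym(num):
--     numMap = {0: 'A',
--               1: 'C',
--               2: 'G',
--               3: 'T'}
--     return numMap[num]
--
-- def numToPat(index, k):
--     if k == 1:
--         return numToSym(index)
--     pfixIndex = int(index / 4)
--     r = index % 4
--     sym = numToSym(r)
--     pfixPattern = numToPat(pfixIndex, k - 1)
--     return pfixPattern + sym
-- ===== SOURCE B (Python) =====
-- def numToPat(index, k):
--     syms = "ACGT"
--     digits = []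
--     for _ in range(k - 1):
--         digits.append(syms[index % 4])
--         index = int(index / 4)
--     return syms[index] + "".join(reversed(digits))
-- ===== Notes on version B (the rewrite author's own statement) =====
-- stated objective: alternative
-- what changed: Replaces A's recursion (which concatenates a growing prefix string at every level) by a single iterative loop that collects the k-1 low base-4 digit symbols in a list, then emits the top symbol plus one reversed join.
import Mathlib
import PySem

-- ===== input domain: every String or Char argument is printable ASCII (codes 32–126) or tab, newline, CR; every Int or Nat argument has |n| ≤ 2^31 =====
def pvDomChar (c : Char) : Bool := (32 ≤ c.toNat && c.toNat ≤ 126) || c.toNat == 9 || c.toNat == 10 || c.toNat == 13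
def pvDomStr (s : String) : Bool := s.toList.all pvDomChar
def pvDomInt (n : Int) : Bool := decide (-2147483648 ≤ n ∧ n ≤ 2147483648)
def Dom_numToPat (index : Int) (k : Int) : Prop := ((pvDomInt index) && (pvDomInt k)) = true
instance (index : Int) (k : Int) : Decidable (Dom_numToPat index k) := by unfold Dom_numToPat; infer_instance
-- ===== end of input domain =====

-- B replaces A's recursive prefix-concatenation by one iterative loop collecting digit symbols, reversed and joined once.


-- ===== PORT A =====
-- numMap[num]: dict lookup; '?' stands for the KeyError branch, which Pre_ excludes.
def numToSymA (num : Int) : List Char :=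
  if num = 0 then ['A'] else if num = 1 then ['C'] else if num = 2 then ['G']
  else if num = 3 then ['T'] else ['?']

-- A's recursion on k, with k == 1 as base case; fuel = (k-1).toNat encodes it
-- (for k ≤ 0 Python recurses forever — RecursionError, excluded by Pre_).
-- int(index / 4) is exact trunc-division for |index| < 2^53 → PySem.Int.truncdiv.
def numToPatA (index : Int) : Nat → List Char
  | 0 => numToSymA index
  | n + 1 =>
      let pfixIndex := PySem.Int.truncdiv index 4
      let r := PySem.Int.mod index 4
      let sym := numToSymA r
      let pfixPattern := numToPatA pfixIndex n
      pfixPattern ++ sym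

def numToPat (index : Int) (k : Int) : String :=
  String.ofList (numToPatA index (k - 1).toNat)

-- ===== PORT B =====
-- syms[i]: Python string indexing (negative wraps, IndexError excluded by Pre_) → pyGet?; '?' is the IndexError branch.
def bSym (i : Int) : Char := (PySem.List.pyGet? "ACGT".toList i).getD '?'

def numToPat_alt (index : Int) (k : Int) : String :=
  let st := (List.range (k - 1).toNat).foldl
    (fun (st : Int × List Char) _ =>
      (PySem.Int.truncdiv st.1 4, st.2 ++ [bSym (PySem.Int.mod st.1 4)]))
    (index, [])
  String.ofList (bSym st.1 :: st.2.reverse)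

-- ===== PRECONDITION & SPEC =====
-- Pre_ = exactly the inputs on which the Python A returns: it excludes k ≥ 997, where A's
-- k-deep recursion exceeds CPython's default recursion limit of 1000 and raises RecursionError
-- (measured boundary: a bare top-level call returns through k = 998 and raises at k = 999, and
-- each extra caller frame lowers that by one, so k ≤ 996 is the exact raise-free range);
-- k ≤ 0, where A recurses forever (also RecursionError); and index whose top base-4 digit
-- falls outside 0..3, where numToSym's dict lookup raises KeyError.
def Pre_numToPat (index : Int) (k : Int) : Prop :=
  1 ≤ k ∧ k ≤ 996 ∧ -(4 ^ (k - 1).toNat) < index ∧ index < 4 ^ k.toNat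
instance (index : Int) (k : Int) : Decidable (Pre_numToPat index k) := by
  unfold Pre_numToPat; infer_instance

def pvWitness_numToPat : Int × Int := (7, 2)

def Spec_numToPat (index : Int) (k : Int) (out : String) : Prop := out = numToPat_alt index k
instance (index : Int) (k : Int) (out : String) : Decidable (Spec_numToPat index k out) := by
  unfold Spec_numToPat; infer_instance

-- ===== CLAIM (what is proved, stated in full; the proofs are below) =====
def Claim_equal_numToPat : Prop :=
  ∀ (index : Int) (k : Int), Dom_numToPat index k → Pre_numToPat index k →
    Spec_numToPat index k (numToPat index k)

-- ===== LEMMAS AND PROOFS =====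

-- B's loop body as a step function
def bStep (st : Int × List Char) : Int × List Char :=
  (PySem.Int.truncdiv st.1 4, st.2 ++ [bSym (PySem.Int.mod st.1 4)])

lemma foldl_range_eq_iterate (n : Nat) (init : Int × List Char) :
    (List.range n).foldl (fun st _ => bStep st) init = bStep^[n] init := by
  induction n generalizing init with
  | zero => rfl
  | succ m ih =>
      rw [List.range_succ, List.foldl_append, ih, Function.iterate_succ_apply']
      rfl

lemma iterate_snd (n : Nat) : ∀ (i : Int) (ds : List Char),
    bStep^[n] (i, ds) = ((bStep^[n] (i, [])).1, ds ++ (bStep^[n] (i, [])).2) := by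
  induction n with
  | zero => intro i ds; simp
  | succ m ih =>
      intro i ds
      rw [Function.iterate_succ_apply, Function.iterate_succ_apply, bStep, bStep]
      rw [ih (PySem.Int.truncdiv i 4) (ds ++ [bSym (PySem.Int.mod i 4)]),
          ih (PySem.Int.truncdiv i 4) ([] ++ [bSym (PySem.Int.mod i 4)])]
      simp

lemma sym_eq (d : Int) (h0 : 0 ≤ d) (h1 : d < 4) : numToSymA d = [bSym d] := by
  interval_cases d <;> decide

lemma tdiv_bounds (i P : Int) (hP : 0 < P) (hl : -(4 * P) < i) (hr : i < 16 * P) :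
    -P < PySem.Int.truncdiv i 4 ∧ PySem.Int.truncdiv i 4 < 4 * P := by
  unfold PySem.Int.truncdiv
  by_cases h : 0 ≤ i
  · rw [Int.tdiv_eq_ediv_of_nonneg h]; omega
  · have : i.tdiv 4 = -((-i) / 4) := by
      rw [← Int.tdiv_eq_ediv_of_nonneg (by omega : (0:Int) ≤ -i), ← Int.neg_tdiv, neg_neg]
    omega

lemma main_lemma (n : Nat) : ∀ i : Int, -(4 ^ n) < i → i < 4 ^ (n + 1) →
    numToPatA i n = bSym (bStep^[n] (i, [])).1 :: (bStep^[n] (i, [])).2.reverse := by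
  induction n with
  | zero =>
      intro i h0 h1
      norm_num at h0 h1
      rw [Function.iterate_zero_apply]
      simpa [numToPatA] using sym_eq i (by omega) h1
  | succ m ih =>
      intro i h0 h1
      have hP : (0:Int) < 4 ^ m := by positivity
      have hb := tdiv_bounds i (4 ^ m) hP
        (by rw [pow_succ] at h0; omega) (by rw [pow_succ, pow_succ] at h1; omega)
      have hIH := ih (PySem.Int.truncdiv i 4)
        (by omega) (by rw [pow_succ]; omega)
      have hmod0 := PySem.Int.mod_nonneg i (by norm_num : (0:Int) < 4)
      have hmod1 := PySem.Int.mod_lt i (by norm_num : (0:Int) < 4)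
      rw [Function.iterate_succ_apply,
          show bStep (i, []) = (PySem.Int.truncdiv i 4, [bSym (PySem.Int.mod i 4)]) from rfl]
      show numToPatA (PySem.Int.truncdiv i 4) m ++ numToSymA (PySem.Int.mod i 4) = _
      rw [iterate_snd m (PySem.Int.truncdiv i 4) [bSym (PySem.Int.mod i 4)], hIH,
          sym_eq _ hmod0 hmod1]
      simp

-- ===== VERDICT (by name: the statement is the Claim_ definition above) =====
theorem numToPat_spec : Claim_equal_numToPat := by
  intro index k _ hpre
  obtain ⟨hk1, _, hl, hr⟩ := hpre
  unfold Spec_numToPat numToPat numToPat_alt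
  show String.ofList (numToPatA index (k - 1).toNat) =
    String.ofList
      (bSym ((List.range (k - 1).toNat).foldl (fun st _ => bStep st) (index, [])).1 ::
        ((List.range (k - 1).toNat).foldl (fun st _ => bStep st) (index, [])).2.reverse)
  have hkn : k.toNat = (k - 1).toNat + 1 := by omega
  rw [foldl_range_eq_iterate, main_lemma (k - 1).toNat index hl (by rw [← hkn]; exact hr)]
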